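-- pv_equiv track=rewrite | github.com/Mark-Hopkins-at-Williams/testperanto | testperanto/trees.py | dfs_sort
-- ===== SOURCE A (Python) =====
-- def dfs_sort(positions, postorder=True):
--     """Sorts a list of positions in depth-first search order.
--
--     If the postorder flag is set to True, then visit children before parents;
--     otherwise visit parents before children.
--
--     Parameters
--     ----------
--     positions : list[tuple]
--         A list of positions.
--     postorder : boolean
--         Set True in order to visit children before parents in the DFS search.
--
--     Returns
--     -------
--     list[tuple]:
--         The positions of the argument list, sorted in DFS order.
--
--     >>> dfs_sort( [ (1,2), (2,1,1), (2,1,2), (), (1,2,1), (1,), (2,) , (1,1), (3,), (1,2,2) ] )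
--     [(1, 1), (1, 2, 1), (1, 2, 2), (1, 2), (1,), (2, 1, 1), (2, 1, 2), (2,), (3,), ()]
--     >>> dfs_sort( [ (1,2), (2,1,1), (2,1,2), (), (1,2,1), (1,), (2,) , (1,1), (3,), (1,2,2) ], False )
--     [(), (1,), (1, 1), (1, 2), (1, 2, 1), (1, 2, 2), (2,), (2, 1, 1), (2, 1, 2), (3,)]
--     """
--
--     def get_kth_element(x,k):
--         post_constant = 0
--         if postorder:
--             post_constant = float('inf')
--         if k < len(x):
--             return x[k]
--         else:
--             return post_constant
--     if len(positions) == 0: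
--         return []
--     treedepth = max( map( len, positions ))
--     depths = list(range(treedepth))
--     depths.reverse()
--     for depth in depths:
--         positions = sorted(positions, key=lambda x: get_kth_element(x, depth) )
--     return positions
-- ===== SOURCE B (Python) =====
-- def dfs_sort(positions, postorder=True):
--     """Single stable sort by the full padded key tuple (one lexicographic
--     pass instead of one stable pass per depth)."""
--     if len(positions) == 0:
--         return []
--     pad = float('inf') if postorder else 0
--     treedepth = max(map(len, positions))
--     return sorted(positions,
--                   key=lambda x: tuple(x[k] if k < len(x) else pad
--                                       for k in range(treedepth)))
-- ===== Notes on version B (the rewrite author's own statement) =====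
-- stated objective: simpler
-- what changed: A performs one stable sort pass per tree depth, LSD-radix style, looping over depths from deepest to 0; B computes the same order with a single sorted() call whose key is the full tuple of per-depth components (x[k] or the 0/inf pad), relying on lexicographic tuple comparison.
import Mathlib
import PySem

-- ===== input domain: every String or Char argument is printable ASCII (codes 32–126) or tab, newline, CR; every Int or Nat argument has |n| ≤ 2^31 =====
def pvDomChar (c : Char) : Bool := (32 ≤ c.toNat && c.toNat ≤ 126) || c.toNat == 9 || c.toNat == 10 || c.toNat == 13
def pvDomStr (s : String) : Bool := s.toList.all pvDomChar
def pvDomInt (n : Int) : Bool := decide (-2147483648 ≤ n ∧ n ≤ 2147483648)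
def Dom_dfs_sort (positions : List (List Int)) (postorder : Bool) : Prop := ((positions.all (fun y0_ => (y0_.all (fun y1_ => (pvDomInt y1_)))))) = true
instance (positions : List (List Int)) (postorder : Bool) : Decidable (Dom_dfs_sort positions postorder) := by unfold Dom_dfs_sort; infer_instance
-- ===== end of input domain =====

-- B replaces A's cascade of one stable sort pass per depth by ONE stable sort on
-- the full padded key tuple (objective: simpler — a single sorting pass).

-- ===== PORT A =====
-- Python's per-pass key is either the int x[k] or float('inf') (or the int 0).
-- The order 'every int < inf' is encoded exactly as 2-element lists compared
-- lexicographically: int v ↦ [0, v], inf ↦ [1, 0] (so the pad 0 is [0, 0]).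
-- x[k] under the guard 0 ≤ k < len(x) is PySem.List.pyGetD x k 0.
def dfs_sort (positions : List (List Int)) (postorder : Bool) : List (List Int) :=
  let post_constant : List Int := if postorder then [1, 0] else [0, 0]
  let get_kth_element : List Int → Int → List Int := fun x k =>
    if k < (x.length : Int) then [0, PySem.List.pyGetD x k 0] else post_constant
  if positions.length = 0 then []
  else
    match PySem.List.max? (positions.map (fun p => (p.length : Int))) (fun v => v) with
    | none => []     -- unreachable: positions is nonempty
    | some treedepth =>
      let depths := (PySem.List.pyRange 0 treedepth 1).reverse
      depths.foldl
        (fun acc depth => PySem.List.sorted acc (fun x => get_kth_element x depth) false)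
        positions

-- ===== PORT B =====
-- Same int-or-inf encoding per tuple component; the tuple key is the list of the
-- encoded components, compared lexicographically exactly as Python compares the
-- tuple of ints/inf.
def dfs_sort_alt (positions : List (List Int)) (postorder : Bool) : List (List Int) :=
  if positions.length = 0 then []
  else
    let pad : List Int := if postorder then [1, 0] else [0, 0]
    match PySem.List.max? (positions.map (fun p => (p.length : Int))) (fun v => v) with
    | none => []     -- unreachable: positions is nonempty
    | some treedepth =>
      PySem.List.sorted positions
        (fun x => (PySem.List.pyRange 0 treedepth 1).map
          (fun k => if k < (x.length : Int) then [0, PySem.List.pyGetD x k 0] else pad))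
        false

-- ===== PRECONDITION & SPEC =====
def Spec_dfs_sort (positions : List (List Int)) (postorder : Bool) (out : List (List Int)) : Prop := out = dfs_sort_alt positions postorder
instance (positions : List (List Int)) (postorder : Bool) (out : List (List Int)) : Decidable (Spec_dfs_sort positions postorder out) := by unfold Spec_dfs_sort; infer_instance

-- ===== CLAIM (what is proved, stated in full; the proofs are below) =====
def Claim_equal_dfs_sort : Prop := ∀ (positions : List (List Int)) (postorder : Bool), Dom_dfs_sort positions postorder → Spec_dfs_sort positions postorder (dfs_sort positions postorder)

-- ===== LEMMAS AND PROOFS =====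

-- `sorted` does not depend on which DecidableLT instance is in scope.
theorem pvSorted_inst {α κ : Type} [LT κ] (d1 d2 : DecidableLT κ) (xs : List α) (kd : α → κ) :
    @PySem.List.sorted α κ _ d1 xs kd false = @PySem.List.sorted α κ _ d2 xs kd false := by
  rw [Subsingleton.elim d1 d2]

-- `insertBy` preserves a Pairwise invariant.
theorem pvPairwise_insertBy {α : Type} {R : α → α → Prop} (before : α → α → Bool) (x : α) :
    ∀ (acc : List α), acc.Pairwise R →
    (∀ y ∈ acc, before x y = false → R y x) →
    (∀ y ∈ acc, before x y = true → R x y) →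
    (∀ y z, y ∈ acc → z ∈ acc → before x y = true → R y z → R x z) →
    (PySem.List.insertBy before x acc).Pairwise R := by
  intro acc
  induction acc with
  | nil => intro _ _ _ _; simp [PySem.List.insertBy]
  | cons y t ih =>
    intro h h1 h2 h3
    rw [List.pairwise_cons] at h
    show (if before x y then x :: y :: t else y :: PySem.List.insertBy before x t).Pairwise R
    by_cases hb : before x y = true
    · rw [if_pos hb]
      refine List.Pairwise.cons ?_ (List.Pairwise.cons h.1 h.2)
      intro w hw
      rcases List.mem_cons.mp hw with rfl | hw
      · exact h2 w (by simp) hb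
      · exact h3 y w (by simp) (by simp [hw]) hb (h.1 w hw)
    · rw [if_neg hb]
      refine List.Pairwise.cons ?_ ?_
      · intro w hw
        rw [PySem.List.mem_insertBy] at hw
        rcases hw with rfl | hw
        · exact h1 y (by simp) (by simpa using hb)
        · exact h.1 w hw
      · exact ih h.2 (fun a ha hf => h1 a (by simp [ha]) hf)
          (fun a ha hf => h2 a (by simp [ha]) hf)
          (fun a b ha hb' hf hr => h3 a b (by simp [ha]) (by simp [hb']) hf hr)

-- `insertBy` with a `<`-on-key test preserves key-sortedness.
theorem pvInsertBy_sorted {α κ : Type} [LinearOrder κ] (kd : α → κ) (x : α)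
    (acc : List α) (h : acc.Pairwise (fun a b => kd a ≤ kd b)) :
    (PySem.List.insertBy (fun a b => decide (kd a < kd b)) x acc).Pairwise
      (fun a b => kd a ≤ kd b) := by
  refine pvPairwise_insertBy _ x acc h ?_ ?_ ?_
  · intro y _ hf; simpa using le_of_not_gt (by simpa using hf)
  · intro y _ ht; exact le_of_lt (by simpa using ht)
  · intro y z _ _ ht hr; exact le_trans (le_of_lt (by simpa using ht)) hr

-- Filtering by a predicate that is constant on key classes commutes with `insertBy`.
theorem pvFilter_insertBy {α κ : Type} [LinearOrder κ] (kd : α → κ) (p : α → Bool) (x : α)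
    (hrefine : ∀ y z, p y = true → p z = true → kd y = kd z) :
    ∀ (acc : List α), acc.Pairwise (fun a b => kd a ≤ kd b) →
    (PySem.List.insertBy (fun a b => decide (kd a < kd b)) x acc).filter p
      = if p x then acc.filter p ++ [x] else acc.filter p := by
  intro acc
  induction acc with
  | nil =>
    intro _
    show List.filter p [x] = _
    by_cases hp : p x <;> simp [hp]
  | cons y t ih =>
    intro h
    rw [List.pairwise_cons] at h
    show (if decide (kd x < kd y) then x :: y :: t else
        y :: PySem.List.insertBy (fun a b => decide (kd a < kd b)) x t).filter p = _
    by_cases hlt : kd x < kd y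
    · rw [if_pos (by simpa using hlt)]
      by_cases hp : p x
      · -- no element of y :: t passes p (its key would equal kd x < its own key)
        have hnone : ∀ z ∈ y :: t, p z = false := by
          intro z hz
          by_contra hpz
          have hpz' : p z = true := by simpa using hpz
          have hk : kd z = kd x := hrefine z x hpz' hp
          have hyz : kd y ≤ kd z := by
            rcases List.mem_cons.mp hz with rfl | hz'
            · exact le_refl _
            · exact h.1 z hz'
          exact absurd (lt_of_lt_of_le hlt hyz) (by simp [hk])
        rw [if_pos hp]
        rw [List.filter_cons_of_pos hp]
        have hempty : (y :: t).filter p = [] := List.filter_eq_nil_iff.mpr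
          (fun z hz => by simp [hnone z hz])
        simp [hempty]
      · simp only [if_neg hp]
        simp [List.filter_cons_of_neg (by simpa using hp)]
    · rw [if_neg (by simpa using hlt)]
      by_cases hpy : p y
      · rw [List.filter_cons_of_pos hpy, ih h.2, List.filter_cons_of_pos hpy]
        by_cases hp : p x <;> simp [hp]
      · rw [List.filter_cons_of_neg (by simpa using hpy), ih h.2,
            List.filter_cons_of_neg (by simpa using hpy)]

theorem pvSorted_filter_aux {α κ : Type} [LinearOrder κ] (kd : α → κ) (p : α → Bool)
    (hrefine : ∀ y z, p y = true → p z = true → kd y = kd z) :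
    ∀ (L acc : List α), acc.Pairwise (fun a b => kd a ≤ kd b) →
    (L.foldl (fun acc x => PySem.List.insertBy (fun a b => decide (kd a < kd b)) x acc) acc).filter p
      = acc.filter p ++ L.filter p := by
  intro L
  induction L with
  | nil => intro acc _; simp
  | cons x L ih =>
    intro acc hacc
    rw [List.foldl_cons, ih _ (pvInsertBy_sorted kd x acc hacc),
        pvFilter_insertBy kd p x hrefine acc hacc]
    by_cases hp : p x
    · rw [if_pos hp, List.filter_cons_of_pos hp]; simp
    · rw [if_neg hp, List.filter_cons_of_neg (by simpa using hp)]

-- STABILITY: a stable sort does not move elements relative to each other inside a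
-- key class, so filtering by any class-refining predicate is unchanged by the sort.
theorem pvSorted_filter {α κ : Type} [LinearOrder κ] (kd : α → κ) (p : α → Bool)
    (hrefine : ∀ y z, p y = true → p z = true → kd y = kd z) (xs : List α) :
    (PySem.List.sorted xs kd false).filter p = xs.filter p := by
  rw [PySem.List.sorted_eq_foldl_insertBy]
  simpa using pvSorted_filter_aux kd p hrefine xs [] (by simp)

theorem pvSorted_tie_aux {α κ₁ κ₂ : Type} [LinearOrder κ₁] [LinearOrder κ₂]
    (kd : α → κ₁) (g : α → κ₂) :
    ∀ (L acc : List α),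
    acc.Pairwise (fun a b => kd a ≤ kd b ∧ (kd a = kd b → g a ≤ g b)) →
    (∀ a ∈ acc, ∀ y ∈ L, g a ≤ g y) →
    L.Pairwise (fun a b => g a ≤ g b) →
    (L.foldl (fun acc x => PySem.List.insertBy (fun a b => decide (kd a < kd b)) x acc) acc).Pairwise
      (fun a b => kd a ≤ kd b ∧ (kd a = kd b → g a ≤ g b)) := by
  intro L
  induction L with
  | nil => intro acc hacc _ _; simpa using hacc
  | cons x L ih =>
    intro acc hacc hcross hL
    rw [List.pairwise_cons] at hL
    rw [List.foldl_cons]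
    refine ih _ ?_ ?_ hL.2
    · refine pvPairwise_insertBy _ x acc hacc ?_ ?_ ?_
      · intro y hy hf
        have hle : kd y ≤ kd x := le_of_not_gt (by simpa using hf)
        exact ⟨hle, fun _ => hcross y hy x (by simp)⟩
      · intro y _ ht
        have : kd x < kd y := by simpa using ht
        exact ⟨le_of_lt this, fun he => absurd he (ne_of_lt this)⟩
      · intro y z _ _ ht hr
        have h1 : kd x < kd y := by simpa using ht
        have h2 : kd x < kd z := lt_of_lt_of_le h1 hr.1
        exact ⟨le_of_lt h2, fun he => absurd he (ne_of_lt h2)⟩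
    · intro a ha y hy
      rw [PySem.List.mem_insertBy] at ha
      rcases ha with rfl | ha
      · exact hL.1 y hy
      · exact hcross a ha y (by simp [hy])

-- STABILITY: sorting a g-sorted list by kd keeps kd-ties g-sorted.
theorem pvSorted_tie {α κ₁ κ₂ : Type} [LinearOrder κ₁] [LinearOrder κ₂]
    (kd : α → κ₁) (g : α → κ₂) (L : List α) (hL : L.Pairwise (fun a b => g a ≤ g b)) :
    (PySem.List.sorted L kd false).Pairwise
      (fun a b => kd a ≤ kd b ∧ (kd a = kd b → g a ≤ g b)) := by
  rw [PySem.List.sorted_eq_foldl_insertBy]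
  exact pvSorted_tie_aux kd g L [] (by simp) (by simp) hL

-- "ys is the stable sort of xs by key f": sorted by f, and every exact-key class
-- appears in ys in the same order as in xs.  These two facts determine ys uniquely.
def pvStable {α κ : Type} [LinearOrder κ] [DecidableEq κ] (f : α → κ) (xs ys : List α) : Prop :=
  ys.Pairwise (fun a b => f a ≤ f b) ∧
  ∀ k : κ, ys.filter (fun y => decide (f y = k)) = xs.filter (fun y => decide (f y = k))

theorem pvStable_unique_aux {α κ : Type} [LinearOrder κ] [DecidableEq κ] (f : α → κ) :
    ∀ ys ys' : List α, ys.Pairwise (fun a b => f a ≤ f b) →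
    ys'.Pairwise (fun a b => f a ≤ f b) →
    (∀ k, ys.filter (fun y => decide (f y = k)) = ys'.filter (fun y => decide (f y = k))) →
    ys = ys' := by
  intro ys
  induction ys with
  | nil =>
    intro ys' _ _ hfil
    cases ys' with
    | nil => rfl
    | cons b t' =>
      have := hfil (f b)
      rw [List.filter_cons_of_pos (by simp)] at this
      simp at this
  | cons a t ih =>
    intro ys' hys hys' hfil
    cases ys' with
    | nil =>
      have := hfil (f a)
      rw [List.filter_cons_of_pos (by simp)] at this
      simp at this
    | cons b t' =>
      rw [List.pairwise_cons] at hys hys'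
      have hab : f a = f b := by
        by_contra hne
        rcases lt_or_gt_of_ne hne with hlt | hgt
        · have := hfil (f a)
          rw [List.filter_cons_of_pos (by simp),
              List.filter_cons_of_neg (by simp [(ne_of_lt hlt).symm])] at this
          have hempty : t'.filter (fun y => decide (f y = f a)) = [] :=
            List.filter_eq_nil_iff.mpr (fun z hz => by
              have : f b ≤ f z := hys'.1 z hz
              simp; exact fun he => absurd (lt_of_lt_of_le hlt this) (by simp [he]))
          rw [hempty] at this; simp at this
        · have := hfil (f b)
          rw [List.filter_cons_of_neg (by simp [(ne_of_lt hgt).symm]),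
              List.filter_cons_of_pos (by simp)] at this
          have hempty : t.filter (fun y => decide (f y = f b)) = [] :=
            List.filter_eq_nil_iff.mpr (fun z hz => by
              have : f a ≤ f z := hys.1 z hz
              simp; exact fun he => absurd (lt_of_lt_of_le hgt this) (by simp [he]))
          rw [hempty] at this; simp at this
      have hfa := hfil (f a)
      rw [List.filter_cons_of_pos (by simp), List.filter_cons_of_pos (by simp [hab])] at hfa
      have hhead : a = b := by simpa using congrArg (fun l => l.headD a) hfa
      subst hhead
      have htails : ∀ k, t.filter (fun y => decide (f y = k)) = t'.filter (fun y => decide (f y = k)) := by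
        intro k
        by_cases hk : f a = k
        · have := hfil k
          rw [List.filter_cons_of_pos (by simp [hk]), List.filter_cons_of_pos (by simp [hk])] at this
          simpa using this
        · have := hfil k
          rwa [List.filter_cons_of_neg (by simp [hk]), List.filter_cons_of_neg (by simp [hk])] at this
      rw [ih t' hys.2 hys'.2 htails]

theorem pvStable_unique {α κ : Type} [LinearOrder κ] [DecidableEq κ] (f : α → κ) (xs : List α) :
    ∀ ys ys' : List α, pvStable f xs ys → pvStable f xs ys' → ys = ys' := by
  intro ys ys' h h'
  exact pvStable_unique_aux f ys ys' h.1 h'.1 (fun k => (h.2 k).trans (h'.2 k).symm)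

-- lexicographic ≤ on cons (the default order on List (List Int))
theorem pvCons_le_iff {a b : List Int} {l m : List (List Int)} :
    a :: l ≤ b :: m ↔ a < b ∨ (a = b ∧ l ≤ m) := by
  rw [le_iff_lt_or_eq, List.cons_lt_cons_iff, le_iff_lt_or_eq]
  constructor
  · rintro ((h | h) | h)
    · exact Or.inl h
    · exact Or.inr ⟨h.1, Or.inl h.2⟩
    · rw [List.cons.injEq] at h; exact Or.inr ⟨h.1, Or.inr h.2⟩
  · rintro (h | ⟨h1, (h2 | h2)⟩)
    · exact Or.inl (Or.inl h)
    · exact Or.inl (Or.inr ⟨h1, h2⟩)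
    · exact Or.inr (by rw [List.cons.injEq]; exact ⟨h1, h2⟩)

-- ONE stable pass by digit kd refines a stable arrangement by the suffix key G
-- into a stable arrangement by the extended key kd :: G.  (LSD radix step.)
theorem pvRadix_step (kd : List Int → List Int) (G : List Int → List (List Int))
    (xs L : List (List Int)) (h : pvStable G xs L) :
    pvStable (fun x => kd x :: G x) xs (PySem.List.sorted L kd false) := by
  rw [pvSorted_inst _ (List.instLinearOrder.toDecidableLT) L kd]
  constructor
  · refine (pvSorted_tie kd G L h.1).imp ?_
    intro a b ⟨hle, htie⟩
    rcases lt_or_eq_of_le hle with hlt | heq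
    · exact pvCons_le_iff.mpr (Or.inl hlt)
    · exact pvCons_le_iff.mpr (Or.inr ⟨heq, htie heq⟩)
  · intro k
    cases k with
    | nil =>
      have hfalse : ∀ (l : List (List Int)),
          l.filter (fun y => decide (kd y :: G y = ([] : List (List Int)))) = [] := by
        intro l; exact List.filter_eq_nil_iff.mpr (fun z _ => by simp)
      rw [hfalse, hfalse]
    | cons k0 k' =>
      have hrefine : ∀ y z, decide (kd y :: G y = k0 :: k') = true →
          decide (kd z :: G z = k0 :: k') = true → kd y = kd z := by
        intro y z hy hz
        simp only [decide_eq_true_eq, List.cons.injEq] at hy hz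
        rw [hy.1, hz.1]
      rw [pvSorted_filter kd _ hrefine L]
      have hsplit : ∀ (l : List (List Int)),
          l.filter (fun y => decide (kd y :: G y = k0 :: k'))
            = (l.filter (fun y => decide (G y = k'))).filter (fun y => decide (kd y = k0)) := by
        intro l
        rw [List.filter_filter]
        apply List.filter_congr
        intro y _
        simp [List.cons.injEq, Bool.decide_and]
      rw [hsplit, hsplit, h.2 k']

-- A's per-depth key and A's cascade of passes, generalized over the depth list.
def pvAkey (postorder : Bool) (k : Int) (x : List Int) : List Int :=
  if k < (x.length : Int) then [0, PySem.List.pyGetD x k 0]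
  else if postorder then [1, 0] else [0, 0]

def pvPasses (postorder : Bool) (ds : List Int) (xs : List (List Int)) : List (List Int) :=
  ds.foldl (fun acc depth => PySem.List.sorted acc (fun x => pvAkey postorder depth x) false) xs

theorem pvPasses_stable (postorder : Bool) (xs : List (List Int)) :
    ∀ ds : List Int,
    pvStable (fun x => ds.reverse.map (fun d => pvAkey postorder d x)) xs
      (pvPasses postorder ds xs) := by
  intro ds
  induction ds using List.reverseRecOn with
  | nil =>
    refine ⟨?_, fun k => rfl⟩
    exact List.pairwise_iff_forall_sublist.mpr (fun _ => by simp)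
  | append_singleton ds d ih =>
    have hfold : pvPasses postorder (ds ++ [d]) xs
        = PySem.List.sorted (pvPasses postorder ds xs) (fun x => pvAkey postorder d x) false := by
      simp [pvPasses, List.foldl_append]
    have hk : (fun x => ((ds ++ [d]).reverse).map (fun d' => pvAkey postorder d' x))
        = fun x => pvAkey postorder d x :: ds.reverse.map (fun d' => pvAkey postorder d' x) := by
      funext x; simp
    rw [hfold, hk]
    exact pvRadix_step (fun x => pvAkey postorder d x)
      (fun x => ds.reverse.map (fun d' => pvAkey postorder d' x)) xs _ ih

-- ===== VERDICT (by name: the statement is the Claim_ definition above) =====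
theorem dfs_sort_spec : Claim_equal_dfs_sort := by
  intro positions postorder _
  unfold Spec_dfs_sort
  cases positions with
  | nil => rfl
  | cons p ps =>
    show dfs_sort (p :: ps) postorder = dfs_sort_alt (p :: ps) postorder
    rcases hM : PySem.List.max? (((p :: ps)).map (fun q => (q.length : Int))) (fun v => v)
      with _ | t
    · exfalso; rw [PySem.List.max?_eq_none_iff] at hM; simp at hM
    · simp only [dfs_sort, dfs_sort_alt, hM]
      show pvPasses postorder ((PySem.List.pyRange 0 t 1).reverse) (p :: ps)
          = PySem.List.sorted (p :: ps)
              (fun x => (PySem.List.pyRange 0 t 1).map (fun k => pvAkey postorder k x)) false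
      have hA := pvPasses_stable postorder (p :: ps) ((PySem.List.pyRange 0 t 1).reverse)
      rw [List.reverse_reverse] at hA
      have hB : pvStable (fun x => (PySem.List.pyRange 0 t 1).map (fun k => pvAkey postorder k x))
          (p :: ps)
          (PySem.List.sorted (p :: ps)
            (fun x => (PySem.List.pyRange 0 t 1).map (fun k => pvAkey postorder k x)) false) := by
        rw [pvSorted_inst _ (List.instLinearOrder.toDecidableLT) (p :: ps)
          (fun x => (PySem.List.pyRange 0 t 1).map (fun k => pvAkey postorder k x))]
        refine ⟨PySem.List.sorted_pairwise _ _, fun k => pvSorted_filter _ _ ?_ _⟩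
        intro y z hy hz
        simp only [decide_eq_true_eq] at hy hz
        rw [hy, hz]
      exact pvStable_unique _ _ _ _ hA hB
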